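-- pv_equiv track=rewrite | github.com/BinneBoi/Factorio-Computer-Compiler | Factorio_Computer_Compiler.py | whileCond
-- ===== SOURCE A (Python) =====
-- def whileCond(lines, i, inputJson, whileNum):
--     expression = lines[i][1:]
--     whileStart = i
--     while i < len(lines) and lines[i][0] != "endwhile":
--         i += 1
--         if len(lines[i]) > 1 and lines[i][0] == "while":
--             # Recursively process nested 'while' statements
--             lines, i, inputJson, whileNum = whileCond(lines, i, inputJson, whileNum)
--     if i < len(lines):
--         lines[whileStart] = ["goto", f"whileStart{whileNum}"] + expression + ["~", "true"]
--         lines[i] = ["goto", f"whileEnd{whileNum}", "true", "&", "true"]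
--     whileNum += 1
--     return lines, i, inputJson, whileNum
-- ===== SOURCE B (Python) =====
-- def whileCond(lines, i, inputJson, whileNum):
--     # Iterative version: an explicit stack of open while-frames replaces recursion.
--     # Mutates `lines` in place, like the original.
--     stack = [(i, lines[i][1:])]
--     while True:
--         if lines[i][0] == "endwhile":
--             start, expression = stack.pop()
--             lines[start] = ["goto", f"whileStart{whileNum}"] + expression + ["~", "true"]
--             lines[i] = ["goto", f"whileEnd{whileNum}", "true", "&", "true"]
--             whileNum += 1
--             if not stack:
--                 return lines, i, inputJson, whileNum
--         i += 1
--         if len(lines[i]) > 1 and lines[i][0] == "while":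
--             stack.append((i, lines[i][1:]))
-- ===== Notes on version B (the rewrite author's own statement) =====
-- stated objective: alternative
-- what changed: A processes nested while-blocks by recursion (one call per block, re-entering the scan loop after each return); B is a single iterative left-to-right scan with an explicit stack of open (start index, expression) frames, pushing on each nested 'while' and rewriting/popping on each 'endwhile', preserving A's LIFO post-order whileNum numbering.
import Mathlib
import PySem

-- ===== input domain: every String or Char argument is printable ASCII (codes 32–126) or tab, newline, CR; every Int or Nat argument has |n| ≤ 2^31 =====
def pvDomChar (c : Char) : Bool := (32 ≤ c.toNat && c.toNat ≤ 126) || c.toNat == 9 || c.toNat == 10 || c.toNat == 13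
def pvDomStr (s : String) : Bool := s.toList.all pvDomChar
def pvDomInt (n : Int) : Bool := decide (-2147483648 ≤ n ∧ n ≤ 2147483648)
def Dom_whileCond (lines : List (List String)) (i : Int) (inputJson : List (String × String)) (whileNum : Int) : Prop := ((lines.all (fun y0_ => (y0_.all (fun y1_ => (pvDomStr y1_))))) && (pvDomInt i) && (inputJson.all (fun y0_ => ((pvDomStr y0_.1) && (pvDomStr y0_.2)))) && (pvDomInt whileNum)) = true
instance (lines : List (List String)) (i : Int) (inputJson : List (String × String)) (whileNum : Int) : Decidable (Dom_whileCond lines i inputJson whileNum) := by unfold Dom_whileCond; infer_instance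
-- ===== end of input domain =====

-- B rewrites the recursive while/endwhile → goto pass of A as a single iterative scan with an explicit
-- stack of open while-frames (same return value; both Pythons mutate `lines` in place identically).

-- Two small facts about PySem indexing, cited by the ports' termination proofs (decreasing_by).
theorem pvGet_inRange {α : Type} {xs : List α} {i : Int} {a : α}
    (h : PySem.List.pyGet? xs i = some a) : -(xs.length : Int) ≤ i ∧ i < (xs.length : Int) := by
  have hne : PySem.List.pyGet? xs i ≠ none := by simp [h]
  have h2 : PySem.Raise.InRange xs.length i := by
    by_contra hc
    exact hne ((PySem.List.pyGet?_eq_none_iff xs i).mpr hc)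
  exact ⟨h2.1, h2.2⟩

theorem pvSet_length {α : Type} {xs ys : List α} {i : Int} {v : α}
    (h : PySem.List.pySet? xs i v = some ys) : ys.length = xs.length := by
  unfold PySem.List.pySet? at h
  cases hk : PySem.List.pyIdx? xs.length i with
  | none => rw [hk] at h; simp at h
  | some k =>
    rw [hk] at h
    simp only [Option.map_some, Option.some_inj] at h
    subst h
    simp

-- ===== PORT A =====
-- A's recursive pass, fuel-indexed; `none` marks exactly the inputs where the Python raises.
mutual
/-- the `while i < len(lines) and lines[i][0] != "endwhile": ...` loop of A -/
def pvALoop : Nat → List (List String) → Int → List (String × String) → Int →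
    Option (List (List String) × Int × (List (String × String)) × Int)
  | 0, _, _, _, _ => none
  | fuel + 1, lines, i, inputJson, whileNum =>
    if i < (lines.length : Int) then
      match PySem.List.pyGet? lines i with
      | none => none
      | some li =>
        match PySem.List.pyGet? li 0 with
        | none => none
        | some h0 =>
          if h0 ≠ "endwhile" then
            -- i += 1
            match PySem.List.pyGet? lines (i + 1) with
            | none => none
            | some li' =>
              if 1 < (li'.length : Int) ∧ PySem.List.pyGet? li' 0 = some "while" then
                match pvAWhileO fuel lines (i + 1) inputJson whileNum with
                | none => none
                | some (lines', i', inputJson', whileNum') =>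
                  pvALoop fuel lines' i' inputJson' whileNum'
              else pvALoop fuel lines (i + 1) inputJson whileNum
          else some (lines, i, inputJson, whileNum)
    else some (lines, i, inputJson, whileNum)

/-- A's `whileCond` body -/
def pvAWhileO : Nat → List (List String) → Int → List (String × String) → Int →
    Option (List (List String) × Int × (List (String × String)) × Int)
  | 0, _, _, _, _ => none
  | fuel + 1, lines, i, inputJson, whileNum =>
    match PySem.List.pyGet? lines i with
    | none => none
    | some l0 =>
      let expression := PySem.List.slice l0 (some 1) none
      match pvALoop fuel lines i inputJson whileNum with
      | none => none
      | some (lines1, i1, inputJson1, whileNum1) =>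
        if i1 < (lines1.length : Int) then
          match PySem.List.pySet? lines1 i
              (["goto", "whileStart" ++ PySem.Int.toStr whileNum1] ++ expression ++ ["~", "true"]) with
          | none => none
          | some lines2 =>
            match PySem.List.pySet? lines2 i1
                ["goto", "whileEnd" ++ PySem.Int.toStr whileNum1, "true", "&", "true"] with
            | none => none
            | some lines3 => some (lines3, i1, inputJson1, whileNum1 + 1)
        else some (lines1, i1, inputJson1, whileNum1 + 1)
end

def whileCond (lines : List (List String)) (i : Int) (inputJson : List (String × String)) (whileNum : Int) :
    List (List String) × Int × (List (String × String)) × Int :=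
  (pvAWhileO (2 * lines.length + 2) lines i inputJson whileNum).getD (lines, i, inputJson, whileNum)

-- ===== PORT B =====
-- B's single iterative scan with an explicit stack of (start index, expression) frames.
mutual
/-- one turn of B's `while True` loop, at the loop top -/
def pvBStep (lines : List (List String)) (i : Int) (inputJson : List (String × String)) (whileNum : Int)
    (stack : List (Int × List String)) :
    Option (List (List String) × Int × (List (String × String)) × Int) :=
  match PySem.List.pyGet? lines i with
  | none => none
  | some li =>
    match PySem.List.pyGet? li 0 with
    | none => none
    | some h0 =>
      if h0 = "endwhile" then
        match stack with
        | [] => none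
        | (start, expression) :: rest =>
          match hs1 : PySem.List.pySet? lines start
              (["goto", "whileStart" ++ PySem.Int.toStr whileNum] ++ expression ++ ["~", "true"]) with
          | none => none
          | some lines1 =>
            match hs2 : PySem.List.pySet? lines1 i
                ["goto", "whileEnd" ++ PySem.Int.toStr whileNum, "true", "&", "true"] with
            | none => none
            | some lines2 =>
              if rest.isEmpty then some (lines2, i, inputJson, whileNum + 1)
              else pvBAdv lines2 i inputJson (whileNum + 1) rest
      else pvBAdv lines i inputJson whileNum stack
  termination_by 2 * ((lines.length : Int) - i).toNat + 1
  decreasing_by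
    · have e1 := pvSet_length hs1
      have e2 := pvSet_length hs2
      omega
    · omega

/-- the tail of B's loop body: `i += 1` and the nested-while push check -/
def pvBAdv (lines : List (List String)) (i : Int) (inputJson : List (String × String)) (whileNum : Int)
    (stack : List (Int × List String)) :
    Option (List (List String) × Int × (List (String × String)) × Int) :=
  match hg : PySem.List.pyGet? lines (i + 1) with
  | none => none
  | some li' =>
    if 1 < (li'.length : Int) ∧ PySem.List.pyGet? li' 0 = some "while" then
      pvBStep lines (i + 1) inputJson whileNum ((i + 1, PySem.List.slice li' (some 1) none) :: stack)
    else pvBStep lines (i + 1) inputJson whileNum stack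
  termination_by 2 * ((lines.length : Int) - i).toNat
  decreasing_by
    · have := (pvGet_inRange hg).2
      omega
    · have := (pvGet_inRange hg).2
      omega
end

def whileCond_alt (lines : List (List String)) (i : Int) (inputJson : List (String × String)) (whileNum : Int) :
    List (List String) × Int × (List (String × String)) × Int :=
  match PySem.List.pyGet? lines i with
  | none => (lines, i, inputJson, whileNum)
  | some l0 =>
    (pvBStep lines i inputJson whileNum [(i, PySem.List.slice l0 (some 1) none)]).getD
      (lines, i, inputJson, whileNum)

-- ===== PRECONDITION & SPEC =====
-- Well-nestedness of the while-block starting at the head of the scanned region, checked by a single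
-- left-to-right scan with a depth counter: `pvScan rest d = some r` says that starting just after an
-- already-opened line, with d further nested blocks pending, every line the scan touches is nonempty
-- and the outermost block closes at offset r.
def pvScan : List (List String) → Nat → Option Nat
  | [], _ => none
  | l :: rest, d =>
    if 1 < l.length ∧ l.headI = "while" then (pvScan rest (d + 1)).map (· + 1)
    else
      match l with
      | [] => none
      | s :: _ =>
        if s = "endwhile" then
          match d with
          | 0 => some 0
          | d' + 1 => (pvScan rest d').map (· + 1)
        else (pvScan rest d).map (· + 1)

/-- the scanned region opens with a nonempty line and is a properly closed while-block -/
def pvWell : List (List String) → Bool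
  | [] => false
  | [] :: _ => false
  | (s :: _) :: rest => if s = "endwhile" then true else (pvScan rest 0).isSome

-- Pre_ excludes (a) out-of-range start indices i, on which A raises IndexError, (b) programs whose
-- scanned region is not a well-nested, properly closed while-block, on which A raises IndexError,
-- and (c) negative start indices whose scan would run past the end of the list and wrap around to
-- the head, re-reading lines it has already rewritten — an accident of Python's negative indexing
-- for a forward line pointer, on which B behaves identically to A.  Negative i whose block closes
-- within the tail is admitted (a negative index is interpreted from the end, as in Python).
def Pre_whileCond (lines : List (List String)) (i : Int) (inputJson : List (String × String)) (whileNum : Int) : Prop :=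
  -(lines.length : Int) ≤ i ∧ i < (lines.length : Int) ∧
    pvWell (lines.drop (if 0 ≤ i then i.toNat else (lines.length + i).toNat)) = true
instance (lines : List (List String)) (i : Int) (inputJson : List (String × String)) (whileNum : Int) : Decidable (Pre_whileCond lines i inputJson whileNum) := by unfold Pre_whileCond; infer_instance

def pvWitness_whileCond : List (List String) × Int × (List (String × String)) × Int :=
  ([["while", "x"], ["y"], ["endwhile"]], 0, [], 0)

def Spec_whileCond (lines : List (List String)) (i : Int) (inputJson : List (String × String)) (whileNum : Int) (out : List (List String) × Int × (List (String × String)) × Int) : Prop := out = whileCond_alt lines i inputJson whileNum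
instance (lines : List (List String)) (i : Int) (inputJson : List (String × String)) (whileNum : Int) (out : List (List String) × Int × (List (String × String)) × Int) : Decidable (Spec_whileCond lines i inputJson whileNum out) := by unfold Spec_whileCond; infer_instance

-- ===== CLAIM (what is proved, stated in full; the proofs are below) =====
def Claim_equal_whileCond : Prop := ∀ (lines : List (List String)) (i : Int) (inputJson : List (String × String)) (whileNum : Int), Dom_whileCond lines i inputJson whileNum → Pre_whileCond lines i inputJson whileNum → Spec_whileCond lines i inputJson whileNum (whileCond lines i inputJson whileNum)

-- ===== LEMMAS AND PROOFS =====

/-- the pair of in-place rewrites both programs perform when a while-block closes -/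
def pvRw (L : List (List String)) (start : Int) (expr : List String) (j w : Int) :
    Option (List (List String)) :=
  (PySem.List.pySet? L start (["goto", "whileStart" ++ PySem.Int.toStr w] ++ expr ++ ["~", "true"])).bind
    (fun L1 => PySem.List.pySet? L1 j ["goto", "whileEnd" ++ PySem.Int.toStr w, "true", "&", "true"])

-- Well-nestedness of the while-block starting at the head of the list: `pvWF lst = some k` says the
-- block opened by line 0 closes at line k, every line the scan touches is nonempty, and nested blocks
-- are properly closed.  (`pvWFA` is the same check starting just after an already-inspected line.)
mutual
def pvWF : List (List String) → Option Nat
  | [] => none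
  | [] :: _ => none
  | (s :: _) :: rest =>
    if s = "endwhile" then some 0 else (pvWFA rest).map (· + 1)
  termination_by lst => 2 * lst.length
  decreasing_by simp; omega
def pvWFA : List (List String) → Option Nat
  | [] => none
  | l' :: rest =>
    if 1 < l'.length ∧ l'.headI = "while" then
      match pvWF (l' :: rest) with
      | none => none
      | some k =>
        match pvWFA (rest.drop k) with
        | none => none
        | some m => some (k + 1 + m)
    else
      match l' with
      | [] => none
      | s :: _ => if s = "endwhile" then some 0 else (pvWFA rest).map (· + 1)
  termination_by lst => 2 * lst.length + 1
  decreasing_by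
    · simp
    · have : (rest.drop k).length ≤ rest.length := by simp
      simp only [List.length_cons]; omega
    · simp only [List.length_cons]; omega
end

theorem pvSet_some {α : Type} (xs : List α) (i : Int) (v : α)
    (h1 : -(xs.length : Int) ≤ i) (h2 : i < (xs.length : Int)) :
    ∃ ys, PySem.List.pySet? xs i v = some ys := by
  unfold PySem.List.pySet? PySem.List.pyIdx?
  split_ifs <;> first | exact ⟨_, rfl⟩ | omega

theorem pvGet_set_self {α : Type} {xs ys : List α} {i : Int} {v : α}
    (h : PySem.List.pySet? xs i v = some ys) : PySem.List.pyGet? ys i = some v := by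
  unfold PySem.List.pySet? at h
  cases hk : PySem.List.pyIdx? xs.length i with
  | none => rw [hk] at h; simp at h
  | some k =>
    rw [hk] at h
    simp only [Option.map_some, Option.some_inj] at h
    subst h
    have hkn : k < xs.length := by
      unfold PySem.List.pyIdx? at hk
      split_ifs at hk <;> simp_all <;> omega
    unfold PySem.List.pyGet?
    rw [List.length_set, hk]
    simp [hkn]

-- transfer: whatever A's loop computes, B's stack loop computes as well
theorem pvT2 : ∀ (f : Nat) (lines : List (List String)) (i : Int) (ij : List (String × String)) (w : Int)
    (out : List (List String) × Int × (List (String × String)) × Int),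
    pvALoop f lines i ij w = some out →
    (∃ c, PySem.List.pyGet? lines i = some c) →
    out.2.2.1 = ij ∧ out.1.length = lines.length ∧
    (∃ cj, PySem.List.pyGet? out.1 out.2.1 = some cj ∧ PySem.List.pyGet? cj 0 = some "endwhile") ∧
    (∀ start expr s r,
      (-(lines.length : Int) ≤ start ∧ start < (lines.length : Int)) →
      (∀ L2, pvRw out.1 start expr out.2.1 out.2.2.2 = some L2 →
        (s = [] → r = (L2, out.2.1, ij, out.2.2.2 + 1)) ∧
        (s ≠ [] → pvBStep L2 out.2.1 ij (out.2.2.2 + 1) s = some r)) →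
      pvBStep lines i ij w ((start, expr) :: s) = some r) := by
  intro f
  induction f using Nat.strong_induction_on with
  | _ f IH =>
  intro lines i ij w out hA hex
  cases f with
  | zero => simp [pvALoop] at hA
  | succ g =>
  obtain ⟨c, hc⟩ := hex
  have hir := pvGet_inRange hc
  rw [pvALoop, if_pos hir.2, hc] at hA
  dsimp only [] at hA
  cases hh : PySem.List.pyGet? c 0 with
  | none => rw [hh] at hA; exact absurd hA (by simp)
  | some h0 =>
  rw [hh] at hA
  dsimp only [] at hA
  by_cases he : h0 = "endwhile"
  · -- loop exit: the current line is the matching endwhile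
    rw [if_neg (by simp [he])] at hA
    simp only [Option.some_inj] at hA
    subst hA
    refine ⟨rfl, rfl, ⟨c, hc, by rw [hh, he]⟩, ?_⟩
    intro start expr s r hstart hcont
    obtain ⟨L1, hL1⟩ := pvSet_some lines start
      (["goto", "whileStart" ++ PySem.Int.toStr w] ++ expr ++ ["~", "true"]) hstart.1 hstart.2
    have hlen1 := pvSet_length hL1
    obtain ⟨L2, hL2⟩ := pvSet_some L1 i
      ["goto", "whileEnd" ++ PySem.Int.toStr w, "true", "&", "true"]
      (by rw [hlen1]; exact hir.1) (by rw [hlen1]; exact hir.2)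
    have hrw : pvRw lines start expr i w = some L2 := by
      unfold pvRw
      rw [hL1]
      dsimp only [Option.bind]
      exact hL2
    obtain ⟨h1, h2⟩ := hcont L2 hrw
    rw [pvBStep.eq_def, hc]
    dsimp only []
    rw [hh]
    dsimp only []
    rw [if_pos he]
    rw [hL1]
    dsimp only []
    rw [hL2]
    dsimp only []
    cases s with
    | nil => simpa using (h1 rfl).symm ▸ rfl
    | cons x s' =>
      have hb := h2 (by simp)
      have hgoto := pvGet_set_self hL2
      rw [pvBStep.eq_def, hgoto] at hb
      dsimp only [] at hb
      rw [PySem.List.pyGet?_zero_cons] at hb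
      dsimp only [] at hb
      rw [if_neg (by simp)] at hb
      simpa using hb
  · -- loop body: advance, maybe into a nested while
    rw [if_pos he] at hA
    cases hd : PySem.List.pyGet? lines (i + 1) with
    | none => rw [hd] at hA; exact absurd hA (by simp)
    | some li' =>
    rw [hd] at hA
    dsimp only [] at hA
    have hdr := pvGet_inRange hd
    by_cases hpush : 1 < (li'.length : Int) ∧ PySem.List.pyGet? li' 0 = some "while"
    · -- nested while: A recurses, B pushes a frame
      rw [if_pos hpush] at hA
      cases hw : pvAWhileO g lines (i + 1) ij w with
      | none => rw [hw] at hA; exact absurd hA (by simp)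
      | some q =>
      obtain ⟨L1, j1, ij1, w1⟩ := q
      rw [hw] at hA
      cases g with
      | zero => simp [pvAWhileO] at hw
      | succ g' =>
      rw [pvAWhileO, hd] at hw
      dsimp only [] at hw
      cases hal : pvALoop g' lines (i + 1) ij w with
      | none => rw [hal] at hw; exact absurd hw (by simp)
      | some q0 =>
      obtain ⟨L0, j0, ij0, w0⟩ := q0
      rw [hal] at hw
      dsimp only [] at hw
      have Hin := IH g' (by omega) lines (i + 1) ij w (L0, j0, ij0, w0) hal ⟨li', hd⟩
      obtain ⟨hij0, hlen0, ⟨cj, hcj, hcjh⟩, Htin⟩ := Hin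
      dsimp only [] at hij0 hlen0 Htin
      have hij0' : ij = ij0 := hij0.symm
      subst hij0'
      clear hij0
      have hj0 := pvGet_inRange hcj
      rw [if_pos (by simpa [hlen0] using hj0.2)] at hw
      cases hset1 : PySem.List.pySet? L0 (i + 1)
          (["goto", "whileStart" ++ PySem.Int.toStr w0] ++ PySem.List.slice li' (some 1) none ++ ["~", "true"]) with
      | none => rw [hset1] at hw; exact absurd hw (by simp)
      | some La =>
      rw [hset1] at hw
      dsimp only [] at hw
      cases hset2 : PySem.List.pySet? La j0
          ["goto", "whileEnd" ++ PySem.Int.toStr w0, "true", "&", "true"] with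
      | none => rw [hset2] at hw; exact absurd hw (by simp)
      | some L1' =>
      rw [hset2] at hw
      dsimp only [] at hw
      simp only [Option.some_inj, Prod.mk.injEq] at hw
      obtain ⟨rfl, rfl, rfl, rfl⟩ := hw
      -- resumed outer loop
      have Hres := IH (g' + 1) (by omega) L1' j0 ij (w0 + 1) out hA ⟨_, pvGet_set_self hset2⟩
      obtain ⟨hij, hlen, hvalid, Htres⟩ := Hres
      have hlenL1 : L1'.length = lines.length := by
        rw [pvSet_length hset2, pvSet_length hset1, hlen0]
      refine ⟨hij, by rw [hlen, hlenL1], hvalid, ?_⟩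
      intro start expr s r hstart hcont
      rw [pvBStep.eq_def, hc]
      dsimp only []
      rw [hh]
      dsimp only []
      rw [if_neg he]
      rw [pvBAdv.eq_def, hd]
      dsimp only []
      rw [if_pos hpush]
      apply Htin (i + 1) (PySem.List.slice li' (some 1) none) ((start, expr) :: s) r ⟨hdr.1, hdr.2⟩
      intro L2' hrw'
      have hL2' : L2' = L1' := by
        simp only [pvRw, hset1, Option.bind_some] at hrw'
        rw [hset2] at hrw'
        exact (Option.some_inj.mp hrw').symm
      subst hL2'
      refine ⟨fun habs => absurd habs (by simp), ?_⟩
      intro _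
      exact Htres start expr s r
        ⟨by rw [hlenL1]; exact hstart.1, by rw [hlenL1]; exact hstart.2⟩ hcont
    · -- ordinary line: both sides advance
      rw [if_neg hpush] at hA
      have Hin := IH g (by omega) lines (i + 1) ij w out hA ⟨li', hd⟩
      obtain ⟨hij, hlen, hvalid, Htin⟩ := Hin
      refine ⟨hij, hlen, hvalid, ?_⟩
      intro start expr s r hstart hcont
      rw [pvBStep.eq_def, hc]
      dsimp only []
      rw [hh]
      dsimp only []
      rw [if_neg he]
      rw [pvBAdv.eq_def, hd]
      dsimp only []
      rw [if_neg hpush]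
      exact Htin start expr s r hstart hcont

theorem pvDropCons {α : Type} {xs : List α} {p : Nat} {l : α} {rest : List α}
    (h : xs.drop p = l :: rest) : xs.drop (p + 1) = rest := by
  have : xs.drop (p + 1) = (xs.drop p).drop 1 := by
    rw [List.drop_drop]
  rw [this, h]
  rfl

theorem pvDropLt {α : Type} {xs : List α} {p : Nat} {l : α} {rest : List α}
    (h : xs.drop p = l :: rest) : p < xs.length := by
  have := congrArg List.length h
  simp at this
  omega

-- wrapped indexing: position p read/written through the Int index p + off, where off is 0 or -len
theorem pvGetW {α : Type} (xs : List α) (p : Nat) (off : Int) (hp : p < xs.length)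
    (hoff : off = 0 ∨ off = -(xs.length : Int)) : PySem.List.pyGet? xs ((p : Int) + off) = xs[p]? := by
  rcases hoff with rfl | rfl
  · simpa using PySem.List.pyGet?_natCast xs p
  · have hne : ¬ (0 ≤ (p : Int) + -(xs.length : Int)) := by omega
    have hin : -(xs.length : Int) ≤ (p : Int) + -(xs.length : Int) := by omega
    unfold PySem.List.pyGet? PySem.List.pyIdx?
    rw [if_neg hne, if_pos hin]
    have hidx : xs.length - (-((p : Int) + -(xs.length : Int))).toNat = p := by omega
    rw [hidx]
    rfl

theorem pvSetW {α : Type} (xs : List α) (p : Nat) (off : Int) (v : α) (hp : p < xs.length)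
    (hoff : off = 0 ∨ off = -(xs.length : Int)) :
    PySem.List.pySet? xs ((p : Int) + off) v = some (xs.set p v) := by
  rcases hoff with rfl | rfl
  · simpa using PySem.List.pySet?_natCast xs p v hp
  · have hne : ¬ (0 ≤ (p : Int) + -(xs.length : Int)) := by omega
    have hin : -(xs.length : Int) ≤ (p : Int) + -(xs.length : Int) := by omega
    unfold PySem.List.pySet? PySem.List.pyIdx?
    rw [if_neg hne, if_pos hin]
    have hidx : xs.length - (-((p : Int) + -(xs.length : Int))).toNat = p := by omega
    rw [hidx]
    rfl

theorem pvGetDropW {α : Type} {xs : List α} {p : Nat} {l : α} {rest' : List α} (off : Int)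
    (hdrop : xs.drop p = l :: rest') (hoff : off = 0 ∨ off = -(xs.length : Int)) :
    PySem.List.pyGet? xs ((p : Int) + off) = some l := by
  rw [pvGetW xs p off (pvDropLt hdrop) hoff, ← List.head?_drop, hdrop]
  rfl

-- sufficiency: on a well-nested block A's fueled port returns (with any fuel ≥ 2·offset+2)
theorem pvS : ∀ (n : Nat) (lst : List (List String)), lst.length ≤ n →
    (∀ k, pvWF lst = some k → ∀ (lines : List (List String)) (p : Nat) ij w (off : Int),
      lines.drop p = lst → p < lines.length → (off = 0 ∨ off = -(lines.length : Int)) → ∀ f, 2 * k + 2 ≤ f →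
      ∃ L W tl, pvAWhileO f lines ((p : Int) + off) ij w = some (L, ((p + k : Nat) : Int) + off, ij, W) ∧
        L.length = lines.length ∧ p + k < lines.length ∧
        L.drop (p + k + 1) = lines.drop (p + k + 1) ∧
        PySem.List.pyGet? L (((p + k : Nat) : Int) + off) = some ("goto" :: tl)) ∧
    (∀ m, pvWFA lst = some m → ∀ (lines : List (List String)) (p : Nat) ij w (off : Int),
      lines.drop (p + 1) = lst → p < lines.length → (off = 0 ∨ off = -(lines.length : Int)) →
      (∃ c h0, PySem.List.pyGet? lines ((p : Int) + off) = some c ∧ PySem.List.pyGet? c 0 = some h0 ∧ h0 ≠ "endwhile") →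
      ∀ f, 2 * m + 2 ≤ f →
      ∃ L W, pvALoop f lines ((p : Int) + off) ij w = some (L, ((p + 1 + m : Nat) : Int) + off, ij, W) ∧
        L.length = lines.length ∧ p + 1 + m < lines.length ∧
        L.drop (p + 1 + m + 1) = lines.drop (p + 1 + m + 1)) := by
  intro n
  induction n with
  | zero =>
    intro lst hl
    have : lst = [] := List.eq_nil_of_length_eq_zero (by omega)
    subst this
    constructor
    · intro k hk; rw [pvWF.eq_def] at hk; exact absurd hk (by simp)
    · intro m hm; rw [pvWFA.eq_def] at hm; exact absurd hm (by simp)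
  | succ n ihn =>
    intro lst hl
    have hS1 : ∀ k, pvWF lst = some k → ∀ (lines : List (List String)) (p : Nat) ij w (off : Int),
        lines.drop p = lst → p < lines.length → (off = 0 ∨ off = -(lines.length : Int)) → ∀ f, 2 * k + 2 ≤ f →
        ∃ L W tl, pvAWhileO f lines ((p : Int) + off) ij w = some (L, ((p + k : Nat) : Int) + off, ij, W) ∧
          L.length = lines.length ∧ p + k < lines.length ∧
          L.drop (p + k + 1) = lines.drop (p + k + 1) ∧
          PySem.List.pyGet? L (((p + k : Nat) : Int) + off) = some ("goto" :: tl) := by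
      intro k hk lines p ij w off hdrop hp hoff f hf
      cases lst with
      | nil => rw [pvWF.eq_def] at hk; exact absurd hk (by simp)
      | cons l rest =>
      cases l with
      | nil => rw [pvWF.eq_def] at hk; exact absurd hk (by simp)
      | cons s t =>
      rw [pvWF.eq_def] at hk
      dsimp only [] at hk
      have hgetp := pvGetDropW off hdrop hoff
      obtain ⟨f1, rfl⟩ : ∃ f1, f = f1 + 1 := ⟨f - 1, by omega⟩
      by_cases hs : s = "endwhile"
      · rw [if_pos hs] at hk
        simp only [Option.some_inj] at hk
        subst hk
        obtain ⟨f2, rfl⟩ : ∃ f2, f1 = f2 + 1 := ⟨f1 - 1, by omega⟩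
        have hplen : ((p : Nat) : Int) + off < (lines.length : Int) := by
          rcases hoff with rfl | rfl <;> push_cast <;> omega
        refine ⟨(lines.set p (["goto", "whileStart" ++ PySem.Int.toStr w] ++
            PySem.List.slice (s :: t) (some 1) none ++ ["~", "true"])).set p
            ["goto", "whileEnd" ++ PySem.Int.toStr w, "true", "&", "true"], w + 1,
          ["whileEnd" ++ PySem.Int.toStr w, "true", "&", "true"], ?_, ?_, ?_, ?_, ?_⟩
        · rw [pvAWhileO, hgetp]
          dsimp only []
          rw [pvALoop, if_pos hplen, hgetp]
          dsimp only []
          rw [PySem.List.pyGet?_zero_cons]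
          dsimp only []
          rw [if_neg (by simp [hs])]
          dsimp only []
          rw [if_pos hplen]
          rw [pvSetW _ _ off _ hp hoff]
          dsimp only []
          rw [pvSetW _ _ off _ (by simpa using hp) (by simpa using hoff)]
          simp
        · simp
        · simpa using hp
        · rw [List.drop_set_of_lt (by omega), List.drop_set_of_lt (by omega)]
        · rw [pvGetW _ _ off (by simp; omega) (by simpa using hoff)]
          exact List.getElem?_set_self (by simp; omega)
      · rw [if_neg hs] at hk
        rw [Option.map_eq_some_iff] at hk
        obtain ⟨m, hm, rfl⟩ := hk
        have hrest := (ihn rest (by simp at hl; omega)).2 m hm lines p ij w off (pvDropCons hdrop) hp hoff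
          ⟨s :: t, s, hgetp, PySem.List.pyGet?_zero_cons _ _, hs⟩ f1 (by omega)
        obtain ⟨L, W, hrun, hLlen, hpos, hframe⟩ := hrest
        have e : p + 1 + m = p + (m + 1) := by omega
        refine ⟨(L.set p (["goto", "whileStart" ++ PySem.Int.toStr W] ++
            PySem.List.slice (s :: t) (some 1) none ++ ["~", "true"])).set (p + 1 + m)
            ["goto", "whileEnd" ++ PySem.Int.toStr W, "true", "&", "true"], W + 1,
          ["whileEnd" ++ PySem.Int.toStr W, "true", "&", "true"], ?_, ?_, ?_, ?_, ?_⟩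
        · rw [pvAWhileO, hgetp]
          dsimp only []
          rw [hrun]
          dsimp only []
          rw [if_pos (by rcases hoff with rfl | rfl <;> push_cast <;> omega)]
          rw [pvSetW _ _ off _ (by omega) (by rw [hLlen]; exact hoff)]
          dsimp only []
          rw [pvSetW _ _ off _ (by simp; omega) (by simpa [hLlen] using hoff)]
          rw [e]
        · simp [hLlen]
        · omega
        · rw [← e, List.drop_set_of_lt (by omega), List.drop_set_of_lt (by omega)]
          exact hframe
        · rw [← e, pvGetW _ _ off (by simp; omega) (by simpa [hLlen] using hoff)]
          exact List.getElem?_set_self (by simp; omega)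
    refine ⟨hS1, ?_⟩
    intro m hm lines p ij w off hdrop hp hoff Hp f hf
    cases lst with
    | nil => rw [pvWFA.eq_def] at hm; exact absurd hm (by simp)
    | cons l' rest =>
    obtain ⟨c, h0, hcp, hch, hne⟩ := Hp
    have hgetp1 := pvGetDropW off hdrop hoff
    have hp1 : p + 1 < lines.length := pvDropLt hdrop
    obtain ⟨f1, rfl⟩ : ∃ f1, f = f1 + 1 := ⟨f - 1, by omega⟩
    have hplen : ((p : Nat) : Int) + off < (lines.length : Int) := by
      rcases hoff with rfl | rfl <;> push_cast <;> omega
    have hcast1 : ((p : Nat) : Int) + off + 1 = ((p + 1 : Nat) : Int) + off := by push_cast; ring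
    rw [pvWFA.eq_def] at hm
    dsimp only [] at hm
    by_cases hcnd : 1 < l'.length ∧ l'.headI = "while"
    · -- a nested while opens right after line p
      rw [if_pos hcnd] at hm
      cases hwf : pvWF (l' :: rest) with
      | none => rw [hwf] at hm; exact absurd hm (by simp)
      | some kin =>
      rw [hwf] at hm
      dsimp only [] at hm
      cases hwfa2 : pvWFA (rest.drop kin) with
      | none => rw [hwfa2] at hm; exact absurd hm (by simp)
      | some m2 =>
      rw [hwfa2] at hm
      dsimp only [] at hm
      simp only [Option.some_inj] at hm
      subst hm
      obtain ⟨s', t', rfl⟩ : ∃ s' t', l' = s' :: t' := by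
        cases l' with
        | nil => simp at hcnd
        | cons a b => exact ⟨a, b, rfl⟩
      have hs'w : s' = "while" := by simpa using hcnd.2
      have hin := hS1 kin hwf lines (p + 1) ij w off hdrop hp1 hoff f1 (by omega)
      obtain ⟨L1, W1, tl, hrun1, hlen1, hpos1, hframe1, hgoto1⟩ := hin
      have hlst_len : (rest.drop kin).length ≤ n := by simp at hl ⊢; omega
      have hdropR : L1.drop (p + 1 + kin + 1) = rest.drop kin := by
        rw [hframe1]
        have e0 : p + 1 + kin + 1 = (p + 1) + (kin + 1) := by omega
        have h1 : lines.drop (p + 1 + kin + 1) = (lines.drop (p + 1)).drop (kin + 1) := by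
          rw [List.drop_drop, e0]
        rw [h1, hdrop]
        simp
      have hposR : p + 1 + kin < L1.length := by omega
      have HpR : ∃ c h0, PySem.List.pyGet? L1 (((p + 1 + kin : Nat) : Int) + off) = some c ∧
          PySem.List.pyGet? c 0 = some h0 ∧ h0 ≠ "endwhile" :=
        ⟨_, "goto", hgoto1, PySem.List.pyGet?_zero_cons _ _, by simp⟩
      have hres := (ihn (rest.drop kin) hlst_len).2 m2 hwfa2 L1 (p + 1 + kin) ij W1 off hdropR hposR
        (by rw [hlen1]; exact hoff) HpR f1 (by omega)
      obtain ⟨L, W, hrun2, hlen2, hpos2, hframe2⟩ := hres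
      have em : p + 1 + kin + 1 + m2 = p + 1 + (kin + 1 + m2) := by omega
      have hpush : 1 < (((s' :: t').length : Nat) : Int) ∧ PySem.List.pyGet? (s' :: t') 0 = some "while" :=
        ⟨by exact_mod_cast hcnd.1, by rw [hs'w]; exact PySem.List.pyGet?_zero_cons _ _⟩
      refine ⟨L, W, ?_, by rw [hlen2, hlen1], by omega, ?_⟩
      · rw [pvALoop, if_pos hplen, hcp]
        dsimp only []
        rw [hch]
        dsimp only []
        rw [if_pos hne]
        rw [hcast1, hgetp1]
        dsimp only []
        rw [if_pos hpush]
        rw [hrun1]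
        dsimp only []
        rw [hrun2, em]
      · have e3 : p + 1 + (kin + 1 + m2) + 1 = (m2 + 1) + (p + 1 + kin + 1) := by omega
        have hlift1 : L.drop (p + 1 + (kin + 1 + m2) + 1) = L1.drop (p + 1 + (kin + 1 + m2) + 1) := by
          have e4 : p + 1 + (kin + 1 + m2) + 1 = p + 1 + kin + 1 + m2 + 1 := by omega
          rw [e4]; exact hframe2
        have hlift2 : L1.drop (p + 1 + (kin + 1 + m2) + 1) = lines.drop (p + 1 + (kin + 1 + m2) + 1) := by
          have hcg := congrArg (List.drop (m2 + 1)) hframe1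
          rw [List.drop_drop, List.drop_drop] at hcg
          have e4 : p + 1 + (kin + 1 + m2) + 1 = p + 1 + kin + 1 + (m2 + 1) := by omega
          rw [e4]
          exact hcg
        rw [hlift1, hlift2]
    · -- ordinary next line (or the closing endwhile)
      rw [if_neg hcnd] at hm
      cases l' with
      | nil => exact absurd hm (by simp)
      | cons s' t' =>
      dsimp only [] at hm
      have hpushneg : ¬(1 < (((s' :: t').length : Nat) : Int) ∧ PySem.List.pyGet? (s' :: t') 0 = some "while") := by
        rintro ⟨hl1, hw⟩
        apply hcnd
        refine ⟨by exact_mod_cast hl1, ?_⟩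
        have hsw : s' = "while" := by
          have := PySem.List.pyGet?_zero_cons s' t'
          rw [this] at hw
          exact Option.some_inj.mp hw
        simp [hsw]
      by_cases hs' : s' = "endwhile"
      · rw [if_pos hs'] at hm
        simp only [Option.some_inj] at hm
        subst hm
        obtain ⟨f2, rfl⟩ : ∃ f2, f1 = f2 + 1 := ⟨f1 - 1, by omega⟩
        refine ⟨lines, w, ?_, rfl, by simpa using hp1, rfl⟩
        rw [pvALoop, if_pos hplen, hcp]
        dsimp only []
        rw [hch]
        dsimp only []
        rw [if_pos hne]
        rw [hcast1, hgetp1]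
        dsimp only []
        rw [if_neg hpushneg]
        rw [pvALoop, if_pos (by rcases hoff with rfl | rfl <;> push_cast <;> omega), hgetp1]
        dsimp only []
        rw [PySem.List.pyGet?_zero_cons]
        dsimp only []
        rw [if_neg (by simp [hs'])]
      · rw [if_neg hs'] at hm
        rw [Option.map_eq_some_iff] at hm
        obtain ⟨m', hm', rfl⟩ := hm
        have hrec := (ihn rest (by simp at hl; omega)).2 m' hm' lines (p + 1) ij w off (pvDropCons hdrop) hp1 hoff
          ⟨s' :: t', s', hgetp1, PySem.List.pyGet?_zero_cons _ _, hs'⟩ f1 (by omega)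
        obtain ⟨L, W, hrun2, hlen2, hpos2, hframe2⟩ := hrec
        have em : p + 1 + 1 + m' = p + 1 + (m' + 1) := by omega
        refine ⟨L, W, ?_, hlen2, by omega, ?_⟩
        · rw [pvALoop, if_pos hplen, hcp]
          dsimp only []
          rw [hch]
          dsimp only []
          rw [if_pos hne]
          rw [hcast1, hgetp1]
          dsimp only []
          rw [if_neg hpushneg]
          rw [hrun2, em]
        · have e3 : p + 1 + (m' + 1) + 1 = p + 1 + 1 + m' + 1 := by omega
          rw [e3]
          exact hframe2

-- unfolding equations for pvWFA on a cons cell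
theorem pvWFA_nil : pvWFA [] = none := by rw [pvWFA.eq_def]

theorem pvWFA_cons_empty (rest : List (List String)) : pvWFA ([] :: rest) = none := by
  rw [pvWFA.eq_def]
  try dsimp only []
  rw [if_neg (by simp)]

theorem pvWFA_cons_push (a : String) (t : List String) (rest : List (List String))
    (hcnd : 1 < (a :: t).length ∧ (a :: t).headI = "while") (hne : a ≠ "endwhile") :
    pvWFA ((a :: t) :: rest) =
      (pvWFA rest).bind (fun k' => (pvWFA (rest.drop (k' + 1))).map (fun m2 => k' + 1 + 1 + m2)) := by
  rw [pvWFA.eq_def]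
  try dsimp only []
  rw [if_pos hcnd, pvWF.eq_def]
  try dsimp only []
  rw [if_neg hne]
  cases hres : pvWFA rest with
  | none => simp
  | some k' =>
    try simp only [Option.map_some, Option.bind_some]
    cases hres2 : pvWFA (rest.drop (k' + 1)) with
    | none => simp
    | some m2 => simp

theorem pvWFA_cons_end (a : String) (t : List String) (rest : List (List String))
    (hcnd : ¬(1 < (a :: t).length ∧ (a :: t).headI = "while")) (hsa : a = "endwhile") :
    pvWFA ((a :: t) :: rest) = some 0 := by
  rw [pvWFA.eq_def]
  try dsimp only []
  rw [if_neg hcnd]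
  try dsimp only []
  rw [if_pos hsa]

theorem pvWFA_cons_neutral (a : String) (t : List String) (rest : List (List String))
    (hcnd : ¬(1 < (a :: t).length ∧ (a :: t).headI = "while")) (hsa : a ≠ "endwhile") :
    pvWFA ((a :: t) :: rest) = (pvWFA rest).map (· + 1) := by
  rw [pvWFA.eq_def]
  try dsimp only []
  rw [if_neg hcnd]
  try dsimp only []
  rw [if_neg hsa]

-- bridge: the flat depth-counter scan of Pre_ agrees with the nested block decomposition pvWF/pvWFA
theorem pvScanChain : ∀ (n : Nat) (lst : List (List String)), lst.length ≤ n →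
    (∀ d, pvScan lst (d + 1) =
      (pvWFA lst).bind (fun k => (pvScan (lst.drop (k + 1)) d).map (fun m => k + 1 + m))) ∧
    pvScan lst 0 = pvWFA lst := by
  intro n
  induction n with
  | zero =>
    intro lst hl
    have : lst = [] := List.eq_nil_of_length_eq_zero (by omega)
    subst this
    exact ⟨fun d => by rw [pvScan, pvWFA_nil]; simp, by rw [pvScan, pvWFA_nil]⟩
  | succ n ihn =>
    intro lst hl
    cases lst with
    | nil => exact ⟨fun d => by rw [pvScan, pvWFA_nil]; simp, by rw [pvScan, pvWFA_nil]⟩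
    | cons l rest =>
    have hrlen : rest.length ≤ n := by simp at hl; omega
    by_cases hcnd : 1 < l.length ∧ l.headI = "while"
    · obtain ⟨a, t, rfl⟩ : ∃ a t, l = a :: t := by
        cases l with
        | nil => simp at hcnd
        | cons a t => exact ⟨a, t, rfl⟩
      have hsne : a ≠ "endwhile" := by
        have h2 := hcnd.2
        simp at h2
        rw [h2]
        decide
      constructor
      · intro d
        rw [pvWFA_cons_push a t rest hcnd hsne]
        rw [pvScan, if_pos hcnd, (ihn rest hrlen).1 (d + 1)]
        cases hres : pvWFA rest with
        | none => simp
        | some k' =>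
        try simp only [Option.map_some, Option.bind_some]
        rw [(ihn (rest.drop (k' + 1)) (le_trans (by simp) hrlen)).1 d]
        cases hres2 : pvWFA (rest.drop (k' + 1)) with
        | none => simp
        | some m2 =>
        try simp only [Option.map_some, Option.bind_some]
        have edrop : (rest.drop (k' + 1)).drop (m2 + 1) = rest.drop (k' + 1 + 1 + m2) := by
          rw [List.drop_drop]
          congr 1
          omega
        rw [edrop, List.drop_succ_cons]
        cases hsc : pvScan (rest.drop (k' + 1 + 1 + m2)) d with
        | none => simp
        | some x => simp; omega
      · rw [pvWFA_cons_push a t rest hcnd hsne]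
        rw [pvScan, if_pos hcnd, (ihn rest hrlen).1 0]
        cases hres : pvWFA rest with
        | none => simp
        | some k' =>
        try simp only [Option.map_some, Option.bind_some]
        rw [(ihn (rest.drop (k' + 1)) (le_trans (by simp) hrlen)).2]
        cases hres2 : pvWFA (rest.drop (k' + 1)) with
        | none => simp
        | some m2 => simp; omega
    · cases l with
      | nil =>
        refine ⟨fun d => ?_, ?_⟩
        · rw [pvScan, if_neg hcnd, pvWFA_cons_empty]
          simp
        · rw [pvScan, if_neg hcnd, pvWFA_cons_empty]
      | cons a t =>
      by_cases hsa : a = "endwhile"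
      · refine ⟨fun d => ?_, ?_⟩
        · rw [pvWFA_cons_end a t rest hcnd hsa]
          rw [pvScan, if_neg hcnd]
          try dsimp only []
          rw [if_pos hsa]
          try simp only [Option.bind_some]
          rw [List.drop_succ_cons, List.drop_zero]
          cases hsc : pvScan rest d with
          | none => simp
          | some x => simp; omega
        · rw [pvWFA_cons_end a t rest hcnd hsa]
          rw [pvScan, if_neg hcnd]
          try dsimp only []
          rw [if_pos hsa]
      · refine ⟨fun d => ?_, ?_⟩
        · rw [pvWFA_cons_neutral a t rest hcnd hsa]
          rw [pvScan, if_neg hcnd]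
          try dsimp only []
          rw [if_neg hsa, (ihn rest hrlen).1 d]
          cases hres : pvWFA rest with
          | none => simp
          | some k' =>
          try simp only [Option.map_some, Option.bind_some]
          rw [List.drop_succ_cons]
          cases hsc : pvScan (rest.drop (k' + 1)) d with
          | none => simp
          | some x => simp; omega
        · rw [pvWFA_cons_neutral a t rest hcnd hsa]
          rw [pvScan, if_neg hcnd]
          try dsimp only []
          rw [if_neg hsa, (ihn rest hrlen).2]

-- ===== VERDICT (by name: the statement is the Claim_ definition above) =====
theorem whileCond_spec : Claim_equal_whileCond := by
  unfold Claim_equal_whileCond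
  intro lines i ij w _hdom hpre
  obtain ⟨hi0, hilt, hwfs⟩ := hpre
  unfold Spec_whileCond
  -- normalize the start index: i = p + off with p the physical position
  obtain ⟨p, off, hoff, hi, hpn, hwp⟩ : ∃ (p : Nat) (off : Int),
      (off = 0 ∨ off = -(lines.length : Int)) ∧ i = (p : Int) + off ∧ p < lines.length ∧
      pvWell (lines.drop p) = true := by
    by_cases h : 0 ≤ i
    · refine ⟨i.toNat, 0, Or.inl rfl, by omega, by omega, ?_⟩
      rw [if_pos h] at hwfs
      exact hwfs
    · refine ⟨(lines.length + i).toNat, -(lines.length : Int), Or.inr rfl, by omega, by omega, ?_⟩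
      rw [if_neg h] at hwfs
      exact hwfs
  subst hi
  -- turn the flat Pre_ scan into the nested decomposition
  have hkex : ∃ k, pvWF (lines.drop p) = some k := by
    cases hlst0 : lines.drop p with
    | nil => rw [hlst0, pvWell] at hwp; simp at hwp
    | cons l0 restl =>
    cases l0 with
    | nil => rw [hlst0, pvWell] at hwp; simp at hwp
    | cons s0 t0 =>
    rw [hlst0, pvWell] at hwp
    rw [pvWF.eq_def]
    dsimp only []
    by_cases hs0 : s0 = "endwhile"
    · rw [if_pos hs0]; exact ⟨0, rfl⟩
    · rw [if_neg hs0]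
      rw [if_neg hs0] at hwp
      rw [(pvScanChain restl.length restl le_rfl).2] at hwp
      obtain ⟨m, hm⟩ := Option.isSome_iff_exists.mp hwp
      exact ⟨m + 1, by rw [hm]; rfl⟩
  obtain ⟨k, hk⟩ := hkex
  have h1 := ((pvS (lines.drop p).length (lines.drop p) le_rfl).1) k hk lines
    p ij w off rfl hpn hoff (2 * k + 2) le_rfl
  obtain ⟨L1, W1, tl1, _, _, hkbound, _, _⟩ := h1
  have h2 := ((pvS (lines.drop p).length (lines.drop p) le_rfl).1) k hk lines
    p ij w off rfl hpn hoff (2 * lines.length + 2) (by omega)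
  obtain ⟨L, W, tl, hrun, hLlen, hposk, hframe, hgoto⟩ := h2
  cases hlst : lines.drop p with
  | nil => rw [hlst, pvWF.eq_def] at hk; exact absurd hk (by simp)
  | cons l0 restl =>
  have hget : PySem.List.pyGet? lines ((p : Int) + off) = some l0 := pvGetDropW off hlst hoff
  obtain ⟨F1, hF⟩ : ∃ F1, 2 * lines.length + 2 = F1 + 1 := ⟨2 * lines.length + 1, rfl⟩
  rw [hF] at hrun
  unfold whileCond
  rw [hF, hrun]
  unfold whileCond_alt
  rw [hget]
  dsimp only []
  -- dissect A's run to feed the transfer lemma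
  rw [pvAWhileO, hget] at hrun
  dsimp only [] at hrun
  cases hal : pvALoop F1 lines ((p : Int) + off) ij w with
  | none => rw [hal] at hrun; exact absurd hrun (by simp)
  | some q =>
  obtain ⟨L0, j0, ij0, w0⟩ := q
  rw [hal] at hrun
  dsimp only [] at hrun
  have Ht := pvT2 F1 lines ((p : Int) + off) ij w (L0, j0, ij0, w0) hal ⟨l0, hget⟩
  obtain ⟨hij0, hlen0, ⟨cj, hcj, hcjh⟩, Htr⟩ := Ht
  dsimp only [] at hij0 hlen0 Htr
  have hij0' : ij = ij0 := hij0.symm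
  subst hij0'
  have hj0 := pvGet_inRange hcj
  rw [if_pos (by simpa [hlen0] using hj0.2)] at hrun
  cases hset1 : PySem.List.pySet? L0 ((p : Int) + off)
      (["goto", "whileStart" ++ PySem.Int.toStr w0] ++ PySem.List.slice l0 (some 1) none ++ ["~", "true"]) with
  | none => rw [hset1] at hrun; exact absurd hrun (by simp)
  | some La =>
  rw [hset1] at hrun
  dsimp only [] at hrun
  cases hset2 : PySem.List.pySet? La j0
      ["goto", "whileEnd" ++ PySem.Int.toStr w0, "true", "&", "true"] with
  | none => rw [hset2] at hrun; exact absurd hrun (by simp)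
  | some L2 =>
  rw [hset2] at hrun
  dsimp only [] at hrun
  simp only [Option.some_inj, Prod.mk.injEq] at hrun
  obtain ⟨hLeq, hj0eq, -, hWeq⟩ := hrun
  have hB := Htr ((p : Int) + off) (PySem.List.slice l0 (some 1) none) [] (L2, j0, ij, w0 + 1)
    ⟨by rcases hoff with rfl | rfl <;> push_cast <;> omega,
     by rcases hoff with rfl | rfl <;> push_cast <;> omega⟩ ?cont
  case cont =>
    intro L2' hrw'
    have hL2' : L2' = L2 := by
      simp only [pvRw, hset1, Option.bind_some] at hrw'
      rw [hset2] at hrw'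
      exact (Option.some_inj.mp hrw').symm
    subst hL2'
    exact ⟨fun _ => rfl, fun habs => absurd rfl habs⟩
  rw [hB, hLeq, hj0eq, hWeq]
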